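-- pv_equiv track=rewrite | github.com/Steap/iptoolsjj | build/lib/iptoolsjj/iptoolsjj.py | dec_to_mask255
-- ===== SOURCE A (Python) =====
-- def _not_full_octet(N,base,P):
--     if N == 1 : return str(base)             # base is 128 , P is 64 ( needs to be so :) )
--     else:
--         base+=P
--         P=P//2                              # added double slash // for python 3 !
--         return _not_full_octet(N-1,base,P)
--
-- def dec_to_mask255(mask_dec):
--     mask255=""
--     for x in range(0,4):                        # 4 times because there are 4 octets of mask
--         if mask_dec >= 8:
--             mask255+="255"
--             mask_dec-=8
--         elif mask_dec > 0:
--              mask255+=_not_full_octet(mask_dec,128,64)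
--              mask_dec=0
--         else: mask255+="0"
--
--         if x!=3 : mask255+="."
--     mask_octets = mask255.split('.')            #puts MASK into array of octets
--     return mask_octets
-- ===== SOURCE B (Python) =====
-- def dec_to_mask255(mask_dec):
--     n = min(max(mask_dec, 0), 32)
--     bits = (0xFFFFFFFF << (32 - n)) & 0xFFFFFFFF
--     return [str((bits >> (8 * i)) & 0xFF) for i in range(3, -1, -1)]
-- ===== Notes on version B (the rewrite author's own statement) =====
-- stated objective: idiomatic
-- what changed: Replaced the per-octet loop with recursive partial-octet construction by a single closed-form clamped-shift bitmask from which the four octets are extracted by bit operations.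
import Mathlib
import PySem

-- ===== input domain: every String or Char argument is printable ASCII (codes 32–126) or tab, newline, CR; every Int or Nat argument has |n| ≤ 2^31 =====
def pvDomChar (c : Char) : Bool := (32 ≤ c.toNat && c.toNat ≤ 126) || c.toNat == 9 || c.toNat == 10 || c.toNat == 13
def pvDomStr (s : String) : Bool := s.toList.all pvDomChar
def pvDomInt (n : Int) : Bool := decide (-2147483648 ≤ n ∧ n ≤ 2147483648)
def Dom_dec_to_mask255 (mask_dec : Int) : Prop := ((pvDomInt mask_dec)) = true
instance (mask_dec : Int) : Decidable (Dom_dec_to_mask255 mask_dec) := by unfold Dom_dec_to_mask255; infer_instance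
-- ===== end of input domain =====

-- B replaces A's per-octet loop + recursive partial-octet builder with a closed-form clamped-shift bitmask (idiomatic, same behaviour on all ints).


-- ===== PORT A =====
-- Helper of A: recursive partial-octet builder. Structural recursion on N as a Nat
-- (the caller passes 1 ≤ N ≤ 7; on N ≤ 0 the Python recurses forever, so that case is unreachable).
def notFullOctet : Nat → Int → Int → String
  | 0, _, _ => ""
  | 1, base, _ => PySem.Int.toStr base
  | n + 2, base, P => notFullOctet (n + 1) (base + P) (PySem.Int.floordiv P 2)

def dec_to_mask255 (mask_dec : Int) : List String :=
  let st := (PySem.List.pyRange 0 4 1).foldl (fun (st : String × Int) x =>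
    let st :=
      if st.2 ≥ 8 then (st.1 ++ "255", st.2 - 8)
      else if st.2 > 0 then (st.1 ++ notFullOctet st.2.toNat 128 64, (0 : Int))
      else (st.1 ++ "0", st.2)
    if x ≠ 3 then (st.1 ++ ".", st.2) else st) ("", mask_dec)
  (PySem.Str.split? st.1 ".").getD []  -- sep "." ≠ "", so split? is always some here


-- ===== PORT B =====
def dec_to_mask255_alt (mask_dec : Int) : List String :=
  let n : Int := min (max mask_dec 0) 32
  let bits : Nat := (4294967295 <<< (32 - n).toNat) &&& 4294967295
  (PySem.List.pyRange 3 (-1) (-1)).map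
    (fun i => PySem.Int.toStr (Int.ofNat ((bits >>> (8 * i.toNat)) &&& 255)))


-- ===== PRECONDITION & SPEC =====
def Spec_dec_to_mask255 (mask_dec : Int) (out : List String) : Prop := out = dec_to_mask255_alt mask_dec
instance (mask_dec : Int) (out : List String) : Decidable (Spec_dec_to_mask255 mask_dec out) := by unfold Spec_dec_to_mask255; infer_instance

-- ===== CLAIM (what is proved, stated in full; the proofs are below) =====
def Claim_equal_dec_to_mask255 : Prop := ∀ (mask_dec : Int), Dom_dec_to_mask255 mask_dec → Spec_dec_to_mask255 mask_dec (dec_to_mask255 mask_dec)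

-- ===== LEMMAS AND PROOFS =====

-- A returns all-zero octets for any non-positive prefix
theorem A_nonpos (m : Int) (h : m ≤ 0) : dec_to_mask255 m = ["0","0","0","0"] := by
  have hr : PySem.List.pyRange 0 4 1 = [0,1,2,3] := by decide
  have h1 : ¬ (m ≥ 8) := by omega
  have h2 : ¬ (m > 0) := by omega
  simp [dec_to_mask255, hr, h1, h2]
  decide

theorem B_nonpos (m : Int) (h : m ≤ 0) : dec_to_mask255_alt m = ["0","0","0","0"] := by
  have hc : min (max m 0) 32 = 0 := by omega
  simp [dec_to_mask255_alt, hc]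
  decide

-- A saturates to all-255 octets for any prefix ≥ 32
theorem A_ge32 (m : Int) (h : 32 ≤ m) : dec_to_mask255 m = ["255","255","255","255"] := by
  have hr : PySem.List.pyRange 0 4 1 = [0,1,2,3] := by decide
  have h1 : (8:Int) ≤ m := by omega
  have h2 : (8:Int) ≤ m - 8 := by omega
  have h3 : (8:Int) ≤ m - 8 - 8 := by omega
  have h4 : (8:Int) ≤ m - 8 - 8 - 8 := by omega
  simp [dec_to_mask255, hr, h1, h2, h3, h4]
  decide

theorem B_ge32 (m : Int) (h : 32 ≤ m) : dec_to_mask255_alt m = ["255","255","255","255"] := by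
  have hc : min (max m 0) 32 = 32 := by omega
  simp [dec_to_mask255_alt, hc]
  decide

-- ===== VERDICT (by name: the statement is the Claim_ definition above) =====
theorem dec_to_mask255_spec : Claim_equal_dec_to_mask255 := by
  intro m _
  unfold Spec_dec_to_mask255
  by_cases h : m ≤ 0
  · rw [A_nonpos m h, B_nonpos m h]
  · by_cases h2 : m < 32
    · have h1 : 0 < m := by omega
      interval_cases m <;> decide
    · have h3 : (32:Int) ≤ m := by omega
      rw [A_ge32 m h3, B_ge32 m h3]
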